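-- pv_equiv track=rewrite | github.com/Nireus79/Socratic-learning | src/socratic_learning/analytics/cohort_analyzer.py | _segment_demographic
-- ===== SOURCE A (Python) =====
-- from typing import Any, Callable, Dict, List, Optional, Tuple
--
-- def _segment_demographic(
--
--     users: List[Dict[str, Any]],
--     key: str,
-- ) -> Dict[str, List[Dict[str, Any]]]:
--     """Segment by demographic attribute."""
--     cohorts: Dict[str, List[Dict[str, Any]]] = {}
--
--     for user in users:
--         value = user.get(key, "unknown")
--         cohort_id = f"{key}_{value}"
--
--         if cohort_id not in cohorts:
--             cohorts[cohort_id] = []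
--         cohorts[cohort_id].append(user)
--
--     return cohorts
-- ===== SOURCE B (Python) =====
-- def _segment_demographic(users, key):
--     """Segment by demographic attribute: list the cohort ids once (first-occurrence
--     order), then collect each cohort's users with a per-cohort filter."""
--     ids = [f"{key}_{u.get(key, 'unknown')}" for u in users]
--     return {
--         cid: [u for u in users if f"{key}_{u.get(key, 'unknown')}" == cid]
--         for cid in dict.fromkeys(ids)
--     }
-- ===== Notes on version B (the rewrite author's own statement) =====
-- stated objective: alternative
-- what changed: Replaces A's single-pass dict accumulation (create-bucket-then-append per user) by a two-pass plan: first compute the ordered-deduplicated list of cohort ids, then build each cohort's user list with a per-cohort filter over the users.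
import Mathlib
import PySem

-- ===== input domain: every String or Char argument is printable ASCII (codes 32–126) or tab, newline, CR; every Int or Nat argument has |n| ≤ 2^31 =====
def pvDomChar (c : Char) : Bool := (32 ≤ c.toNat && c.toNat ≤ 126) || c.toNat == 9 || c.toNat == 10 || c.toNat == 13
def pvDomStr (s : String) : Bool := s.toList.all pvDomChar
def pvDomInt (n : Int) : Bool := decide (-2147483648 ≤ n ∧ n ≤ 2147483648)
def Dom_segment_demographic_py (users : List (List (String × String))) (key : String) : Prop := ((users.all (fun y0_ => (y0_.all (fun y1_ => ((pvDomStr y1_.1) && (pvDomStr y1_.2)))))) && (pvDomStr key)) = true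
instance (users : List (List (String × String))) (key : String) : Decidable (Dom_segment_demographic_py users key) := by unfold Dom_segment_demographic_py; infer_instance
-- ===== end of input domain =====

-- B replaces A's single-pass dict accumulation by a two-pass plan (list the cohort
-- ids once, ordered-deduplicated, then build each cohort by a per-cohort filter);
-- objective: alternative decomposition, same results.

-- shared helper: cohort_id = f"{key}_{user.get(key, 'unknown')}"
def cohortIdOf (key : String) (u : List (String × String)) : String :=
  key ++ "_" ++ PySem.Dict.getD (PySem.Dict.mk u) key "unknown"

-- ===== PORT A =====
def segment_demographic_py (users : List (List (String × String))) (key : String) : List (String × List (List (String × String))) :=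
  (users.foldl (fun cohorts user =>
      let cohort_id := cohortIdOf key user
      let cohorts := if cohorts.contains cohort_id then cohorts
                     else cohorts.insert cohort_id []
      cohorts.modify cohort_id [] (fun l => l ++ [user]))
    PySem.Dict.empty).items

-- ===== PORT B =====
def segment_demographic_py_alt (users : List (List (String × String))) (key : String) : List (String × List (List (String × String))) :=
  let ids := users.map (cohortIdOf key)
  (PySem.List.dedup ids).map (fun cid =>
    (cid, users.filter (fun u => cohortIdOf key u == cid)))

-- ===== PRECONDITION & SPEC =====
def Spec_segment_demographic_py (users : List (List (String × String))) (key : String) (out : List (String × List (List (String × String)))) : Prop := out = segment_demographic_py_alt users key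
instance (users : List (List (String × String))) (key : String) (out : List (String × List (List (String × String)))) : Decidable (Spec_segment_demographic_py users key out) := by unfold Spec_segment_demographic_py; infer_instance

-- ===== CLAIM (what is proved, stated in full; the proofs are below) =====
def Claim_equal_segment_demographic_py : Prop := ∀ (users : List (List (String × String))) (key : String), Dom_segment_demographic_py users key → Spec_segment_demographic_py users key (segment_demographic_py users key)

-- ===== LEMMAS AND PROOFS =====

-- A's per-user step (create-bucket-if-absent, then append) is one dict `modify`.
theorem step_eq_modify (d : PySem.Dict String (List (List (String × String))))
    (c : String) (u : List (String × String)) :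
    (if d.contains c then d else d.insert c []).modify c [] (fun l => l ++ [u])
      = d.modify c [] (fun l => l ++ [u]) := by
  by_cases h : d.contains c = true
  · simp [h]
  · have h' : d.contains c = false := by simpa using h
    simp [h, PySem.Dict.modify, PySem.Dict.insert_insert_self,
      PySem.Dict.getD_of_not_contains (h := h')]

-- ===== VERDICT (by name: the statement is the Claim_ definition above) =====
theorem segment_demographic_py_spec : Claim_equal_segment_demographic_py := by
  intro users key _
  unfold Spec_segment_demographic_py segment_demographic_py segment_demographic_py_alt
  set g := cohortIdOf key with hg
  have hstep : users.foldl (fun cohorts user =>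
      let cohort_id := g user
      let cohorts := if cohorts.contains cohort_id then cohorts
                     else cohorts.insert cohort_id []
      cohorts.modify cohort_id [] (fun l => l ++ [user])) PySem.Dict.empty
      = users.foldl (fun d u => d.modify (g u) [] (fun l => l ++ [u])) PySem.Dict.empty := by
    apply PySem.List.foldl_congr_mem (l := users)
    intro d u _
    exact step_eq_modify d (g u) u
  rw [hstep]
  set F := users.foldl (fun d u => d.modify (g u) [] (fun l => l ++ [u])) PySem.Dict.empty with hF
  have hnd : F.keys.Nodup :=
    PySem.Dict.nodup_keys_foldl_modify_key users g [] (fun _ u => fun l => l ++ [u])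
      PySem.Dict.empty (by simp)
  have hkeys : F.keys = PySem.List.dedup (users.map g) := by
    rw [hF, PySem.Dict.keys_foldl_modify_key, PySem.Dict.keys_empty,
        PySem.List.dedup_eq_ofList, PySem.Set.ofList_eq_foldl]
    rfl
  have hget : ∀ c, F.getD c [] = users.filter (fun u => g u == c) := by
    intro c
    have hmap : F = (users.map (fun u => (g u, u))).foldl
        (fun d p => d.modify p.1 [] (fun l => l ++ [p.2])) PySem.Dict.empty := by
      rw [hF, List.foldl_map]
    rw [hmap, PySem.Dict.getD_foldl_modify_append, PySem.Dict.getD_empty, List.nil_append,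
        List.filter_map, List.map_map]
    simp [Function.comp_def]
  rw [PySem.Dict.items_eq_map_keys F hnd [], hkeys]
  exact List.map_congr_left (fun c _ => by rw [hget c])
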